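-- pv_equiv track=rewrite | github.com/XueDugu/TaintMini | taint_mini/taintmini.py | obtain_valid_page
-- ===== SOURCE A (Python) =====
-- def obtain_valid_page(files):
--     # 创建了一个空的集合（set）并将其赋值给变量sub_pages
--     sub_pages = set()
--     # 将每个文件名分离出来
--     for f in files:
--         sub_pages.add(str.split(f, ".")[0])
--     # 判断分离出的文件是否包含js文件和wxml文件，如果不是都有就不考虑了
--     for f in list(sub_pages):
--         if f"{f}.js" not in files or f"{f}.wxml" not in files:
--             sub_pages.remove(f)
--     return sub_pages
-- ===== SOURCE B (Python) =====
-- def obtain_valid_page(files):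
--     # Group every filename by its first-dot basename, then keep a basename
--     # iff its own group contains both "<base>.js" and "<base>.wxml".
--     groups = {}
--     for f in files:
--         base = f.split(".")[0]
--         groups[base] = groups.get(base, []) + [f]
--     return {b for b, g in groups.items() if f"{b}.js" in g and f"{b}.wxml" in g}
-- ===== Notes on version B (the rewrite author's own statement) =====
-- stated objective: faster
-- what changed: B builds a dict index grouping files by first-dot basename in one pass and decides each basename from its own (small) group, instead of A's build-set-of-all-basenames then per-basename membership scans over the whole file list.
import Mathlib
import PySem

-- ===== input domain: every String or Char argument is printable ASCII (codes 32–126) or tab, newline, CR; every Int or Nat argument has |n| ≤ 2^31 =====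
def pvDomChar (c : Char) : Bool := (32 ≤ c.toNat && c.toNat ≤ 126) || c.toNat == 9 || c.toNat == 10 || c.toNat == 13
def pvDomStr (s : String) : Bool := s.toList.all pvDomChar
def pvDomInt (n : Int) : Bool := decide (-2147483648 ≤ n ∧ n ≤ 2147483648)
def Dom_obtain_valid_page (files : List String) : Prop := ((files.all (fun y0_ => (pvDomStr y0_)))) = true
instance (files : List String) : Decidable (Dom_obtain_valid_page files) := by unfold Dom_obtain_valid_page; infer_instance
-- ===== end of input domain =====

-- B replaces A's build-all-basenames-then-filter-against-the-whole-list by a one-pass dict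
-- grouping files per basename, deciding each basename from its own small group (measured faster).
-- Both Pythons return a set; set outputs are compared as finite sets (iteration order not modelled).

-- ===== PORT A =====
-- str.split(f, ".")[0]: '.' is a nonempty separator, so split? is some and nonempty; [0] = headD.
def pvBaseName (f : String) : String := ((PySem.Str.split? f ".").getD []).headD ""

def obtain_valid_page (files : List String) : List String :=
  let sub_pages : PySem.Set String :=
    files.foldl (fun s f => PySem.Set.add s (pvBaseName f)) PySem.Set.empty
  -- second loop: iterate over list(sub_pages), removing failing entries (element always present,
  -- so Python's set.remove never raises; discard is exact here)
  sub_pages.foldl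
    (fun s f =>
      if !(files.contains (f ++ ".js")) || !(files.contains (f ++ ".wxml")) then
        PySem.Set.discard s f
      else s)
    sub_pages

-- ===== PORT B =====
def obtain_valid_page_alt (files : List String) : List String :=
  let groups : PySem.Dict String (List String) :=
    files.foldl (fun d f => d.modify (pvBaseName f) [] (fun g => g ++ [f])) (PySem.Dict.mk [])
  ((groups.items.filter
      (fun p => p.2.contains (p.1 ++ ".js") && p.2.contains (p.1 ++ ".wxml"))).map Prod.fst)

-- ===== PRECONDITION & SPEC =====
def Spec_obtain_valid_page (files : List String) (out : List String) : Prop := out = obtain_valid_page_alt files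
instance (files : List String) (out : List String) : Decidable (Spec_obtain_valid_page files out) := by unfold Spec_obtain_valid_page; infer_instance

-- ===== CLAIM (what is proved, stated in full; the proofs are below) =====
def Claim_equal_obtain_valid_page : Prop := ∀ (files : List String), Dom_obtain_valid_page files → Spec_obtain_valid_page files (obtain_valid_page files)

-- ===== LEMMAS AND PROOFS =====

theorem go_head_append (sep : List Char) :
    ∀ (fuel : Nat) (l cur : List Char) (as : List (List Char)) (a : List Char),
      (PySem.Chars.splitOn.go sep fuel l cur (as ++ [a])).headD [] = a := by
  intro fuel
  induction fuel with
  | zero => intro l cur as a; simp [PySem.Chars.splitOn.go]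
  | succ n ih =>
    intro l cur as a
    cases l with
    | nil => simp [PySem.Chars.splitOn.go]
    | cons c rest =>
      rw [PySem.Chars.splitOn.go]
      by_cases hp : sep.isPrefixOf (c :: rest) = true
      · rw [if_pos hp]
        have := ih (List.drop sep.length (c :: rest)) [] (cur.reverse :: as) a
        simpa using this
      · rw [if_neg hp]
        exact ih rest (c :: cur) as a

theorem go_head_dot :
    ∀ (fuel : Nat) (l cur : List Char), l.length ≤ fuel →
      (PySem.Chars.splitOn.go ['.'] fuel l cur []).headD []
        = cur.reverse ++ l.takeWhile (fun c => !(c == '.')) := by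
  intro fuel
  induction fuel with
  | zero =>
    intro l cur hl
    rw [List.length_eq_zero_iff.mp (Nat.le_zero.mp hl)]
    simp [PySem.Chars.splitOn.go]
  | succ n ih =>
    intro l cur hl
    cases l with
    | nil => simp [PySem.Chars.splitOn.go]
    | cons c rest =>
      rw [PySem.Chars.splitOn.go]
      by_cases hc : c = '.'
      · rw [if_pos (by simp [List.isPrefixOf, hc])]
        have := go_head_append ['.'] n (List.drop 1 (c :: rest)) [] [] cur.reverse
        simpa [hc] using this
      · rw [if_neg (by simp [List.isPrefixOf]; exact fun h => absurd h.symm hc)]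
        rw [ih rest (c :: cur) (by simpa using Nat.le_of_succ_le_succ hl)]
        simp [hc]

-- pvBaseName is the prefix of the string before the first '.'
theorem pvBaseName_eq_takeWhile (f : String) :
    pvBaseName f = String.ofList (f.toList.takeWhile (fun c => !(c == '.'))) := by
  unfold pvBaseName
  rw [PySem.Str.split?]
  have hsep : (".".toList) = ['.'] := by decide
  rw [hsep, PySem.Chars.split?]
  simp only [List.isEmpty_cons, Option.map_some, Option.getD_some, if_neg Bool.false_ne_true]
  have hmap : ∀ (xs : List (List Char)),
      (xs.map String.ofList).headD "" = String.ofList (xs.headD []) := by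
    intro xs; cases xs with
    | nil => simp
    | cons x xs => simp
  rw [hmap, PySem.Chars.splitOn, go_head_dot _ _ _ (by omega)]
  simp

theorem takeWhile_no_dot (l : List Char) :
    ('.' : Char) ∉ l.takeWhile (fun c => !(c == '.')) := by
  intro h
  have := List.mem_takeWhile_imp h
  simp at this

-- basenames are fixed points decorated: pvBaseName (b ++ ".js") = b when b has no dot
theorem takeWhile_all_append (p : Char → Bool) (xs : List Char) (c : Char) (t : List Char)
    (h : ∀ x ∈ xs, p x = true) (hc : p c = false) :
    (xs ++ c :: t).takeWhile p = xs := by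
  induction xs with
  | nil => simp [hc]
  | cons x xs ih =>
    simp only [List.cons_append, List.takeWhile_cons, h x (by simp), if_pos trivial]
    rw [ih (fun y hy => h y (by simp [hy]))]

theorem pvBaseName_append (b ext : String) (hb : ('.' : Char) ∉ b.toList)
    (hext : ext.toList.head? = some '.') :
    pvBaseName (b ++ ext) = b := by
  rw [pvBaseName_eq_takeWhile]
  cases hel : ext.toList with
  | nil => simp [hel] at hext
  | cons c t =>
    have hc : c = '.' := by simp [hel] at hext; exact hext
    have : (b ++ ext).toList = b.toList ++ c :: t := by simp [hel]
    rw [this, takeWhile_all_append _ _ _ _ (fun x hx => by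
        simp only [Bool.not_eq_eq_eq_not, Bool.not_true, beq_eq_false_iff_ne]
        intro he; exact hb (he ▸ hx))
      (by simp [hc])]
    exact String.ofList_toList

-- A's second loop is a filter
theorem foldl_discard_filter (C : String → Bool) (l : List String) (s : List String) :
    l.foldl (fun t f => if C f then PySem.Set.discard t f else t) s
      = s.filter (fun x => !(C x && l.contains x)) := by
  induction l generalizing s with
  | nil => simp
  | cons a l ih =>
    simp only [List.foldl_cons]
    by_cases hC : C a
    · rw [if_pos hC, ih, PySem.Set.discard, List.filter_filter]
      apply List.filter_congr
      intro x _
      by_cases hx : x = a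
      · simp [hx, hC]
      · simp [hx]
    · rw [if_neg hC, ih]
      apply List.filter_congr
      intro x _
      by_cases hx : x = a
      · simp [hx, hC]
      · simp [hx]

-- first-match lookup in an fst-nodup association list returns the pair itself
theorem find?_eq_self_of_nodup {ps : List (String × List String)}
    (h : (ps.map Prod.fst).Nodup) {p : String × List String} (hp : p ∈ ps) :
    ps.find? (fun q => q.1 == p.1) = some p := by
  induction ps with
  | nil => simp at hp
  | cons a ps ih =>
    simp only [List.map_cons, List.nodup_cons] at h
    rcases List.mem_cons.mp hp with rfl | hp'
    · simp
    · have hne : a.1 ≠ p.1 := by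
        intro he
        exact h.1 (he ▸ List.mem_map_of_mem hp')
      rw [List.find?_cons_of_neg (by simp [hne]), ih h.2 hp']

theorem filter_map_fst {ps : List (String × List String)} (G : String → List String)
    (hG : ∀ p ∈ ps, p.2 = G p.1) (Q : String → List String → Bool) :
    (ps.filter (fun p => Q p.1 p.2)).map Prod.fst
      = (ps.map Prod.fst).filter (fun b => Q b (G b)) := by
  induction ps with
  | nil => simp
  | cons a ps ih =>
    have ha := hG a (by simp)
    have ih' := ih (fun p hp => hG p (by simp [hp]))
    simp only [List.filter_cons, List.map_cons, ← ha]
    by_cases hq : Q a.1 a.2 = true <;> simp [hq, ih']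

-- group of a basename: the files whose basename it is
theorem groups_getD (files : List String) (b : String) :
    (files.foldl (fun d f => d.modify (pvBaseName f) [] (fun g => g ++ [f]))
        (PySem.Dict.mk [])).getD b []
      = files.filter (fun f => pvBaseName f == b) := by
  have h1 : files.foldl (fun d f => d.modify (pvBaseName f) [] (fun g => g ++ [f]))
        (PySem.Dict.mk [])
      = (files.map (fun f => (pvBaseName f, f))).foldl
          (fun d p => d.modify p.1 [] (fun g => g ++ [p.2])) (PySem.Dict.mk []) := by
    rw [List.foldl_map]
  rw [h1, PySem.Dict.getD_foldl_modify_append, List.filter_map, List.map_map]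
  simp [Function.comp_def]
  rfl

theorem main_eq (files : List String) :
    obtain_valid_page files = obtain_valid_page_alt files := by
  unfold obtain_valid_page obtain_valid_page_alt
  set G : String → List String := fun b => files.filter (fun f => pvBaseName f == b) with hGdef
  set groups := files.foldl (fun d f => d.modify (pvBaseName f) [] (fun g => g ++ [f]))
      (PySem.Dict.mk []) with hgroups
  -- B's dict keys are exactly A's set of basenames
  have hkeys : groups.keys = PySem.Set.ofList (files.map pvBaseName) := by
    rw [hgroups, PySem.Dict.keys_foldl_modify_key files pvBaseName [] (fun _ f => (fun g => g ++ [f]))]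
    show PySem.Set.update [] (files.map pvBaseName) = _
    rw [PySem.Set.update_nil_left]
  have hnodup : (groups.items.map Prod.fst).Nodup := by
    show groups.keys.Nodup
    rw [hkeys]; exact PySem.Set.nodup_ofList _
  -- every stored pair is (b, G b)
  have hpair : ∀ p ∈ groups.items, p.2 = G p.1 := by
    intro p hp
    have hfind : groups.items.find? (fun q => q.1 == p.1) = some p :=
      find?_eq_self_of_nodup hnodup hp
    have : groups.getD p.1 [] = p.2 := by
      rw [PySem.Dict.getD, PySem.Dict.get?, hfind]; rfl
    rw [← this, hgroups, groups_getD]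
  -- A's first loop builds the deduplicated basename list
  have hsub : files.foldl (fun s f => PySem.Set.add s (pvBaseName f)) PySem.Set.empty
      = PySem.Set.ofList (files.map pvBaseName) := by
    rw [PySem.Set.ofList_eq_foldl, ← List.foldl_map]; rfl
  rw [hsub, foldl_discard_filter]
  have hB : (groups.items.filter
        (fun p => p.2.contains (p.1 ++ ".js") && p.2.contains (p.1 ++ ".wxml"))).map Prod.fst
      = (groups.items.map Prod.fst).filter
          (fun b => (G b).contains (b ++ ".js") && (G b).contains (b ++ ".wxml")) :=
    filter_map_fst G hpair (fun b g => g.contains (b ++ ".js") && g.contains (b ++ ".wxml"))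
  have hkeys' : groups.items.map Prod.fst = PySem.Set.ofList (files.map pvBaseName) := hkeys
  rw [hB, hkeys']
  apply List.filter_congr
  intro b hb
  have hbmem : b ∈ files.map pvBaseName := (PySem.Set.mem_ofList _ _).mp hb
  obtain ⟨f, _, hbf⟩ := List.mem_map.mp hbmem
  have hnodot : ('.' : Char) ∉ b.toList := by
    rw [← hbf, pvBaseName_eq_takeWhile, String.toList_ofList]
    exact takeWhile_no_dot _
  have hjs : pvBaseName (b ++ ".js") = b := pvBaseName_append b ".js" hnodot rfl
  have hwx : pvBaseName (b ++ ".wxml") = b := pvBaseName_append b ".wxml" hnodot rfl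
  have hfilter : ∀ (y : String), pvBaseName y = b → (G b).contains y = files.contains y := by
    intro y hy
    by_cases hmem : y ∈ files
    · have hGm : y ∈ G b := List.mem_filter.mpr ⟨hmem, by simp [hy]⟩
      rw [List.contains_iff_mem.mpr hGm, List.contains_iff_mem.mpr hmem]
    · have hGm : y ∉ G b := fun h => hmem (List.mem_filter.mp h).1
      rw [Bool.eq_iff_iff, List.contains_iff_mem, List.contains_iff_mem]
      exact ⟨fun h => absurd h hGm, fun h => absurd h hmem⟩
  rw [hfilter _ hjs, hfilter _ hwx]
  have hcont' : List.contains (PySem.Set.ofList (files.map pvBaseName)) b = true :=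
    List.contains_iff_mem.mpr hb
  rw [hcont']
  cases files.contains (b ++ ".js") <;> cases files.contains (b ++ ".wxml") <;> rfl

-- ===== VERDICT (by name: the statement is the Claim_ definition above) =====
theorem obtain_valid_page_spec : Claim_equal_obtain_valid_page := by
  intro files _
  exact main_eq files
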